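-- pv_equiv track=rewrite | github.com/karlaoh99/athletic-predictor | src/optimizer.py | calculate_error3
-- ===== SOURCE A (Python) =====
-- def calculate_error3(result: list, prediction: list) -> int:
--     # For each athlete adds all the athletes who were above
--     # him in the prediction and not in the real result
--
--     e = 0
--     above = []
--     for name in result:
--         try:
--             p_index = prediction.index(name)
--             for i in range(0, p_index):
--                 if prediction[i] not in above:
--                     e += 1
--             above.append(name)
--         except:
--             continue
--
--     return e
-- ===== SOURCE B (Python) =====
-- def calculate_error3(result: list, prediction: list) -> int:
--     # one pass: occurrence-index dict built once, plus a marked-positions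
--     # boolean array, instead of repeated prediction.index and list-membership scans
--     occ = {}
--     for i, name in enumerate(prediction):
--         occ.setdefault(name, []).append(i)
--     marked = [False] * len(prediction)
--     added = set()
--     e = 0
--     for name in result:
--         if name not in occ:
--             continue
--         idxs = occ[name]
--         p = idxs[0]
--         e += p - sum(marked[:p])
--         if name not in added:
--             added.add(name)
--             for i in idxs:
--                 marked[i] = True
--     return e
-- ===== Notes on version B (the rewrite author's own statement) =====
-- stated objective: faster
-- what changed: B builds an occurrence-index dict over prediction once and maintains a marked-positions boolean array plus a processed-name set, so A's repeated prediction.index scan and the per-element 'prediction[i] not in above' list-membership scan disappear.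
import Mathlib
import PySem

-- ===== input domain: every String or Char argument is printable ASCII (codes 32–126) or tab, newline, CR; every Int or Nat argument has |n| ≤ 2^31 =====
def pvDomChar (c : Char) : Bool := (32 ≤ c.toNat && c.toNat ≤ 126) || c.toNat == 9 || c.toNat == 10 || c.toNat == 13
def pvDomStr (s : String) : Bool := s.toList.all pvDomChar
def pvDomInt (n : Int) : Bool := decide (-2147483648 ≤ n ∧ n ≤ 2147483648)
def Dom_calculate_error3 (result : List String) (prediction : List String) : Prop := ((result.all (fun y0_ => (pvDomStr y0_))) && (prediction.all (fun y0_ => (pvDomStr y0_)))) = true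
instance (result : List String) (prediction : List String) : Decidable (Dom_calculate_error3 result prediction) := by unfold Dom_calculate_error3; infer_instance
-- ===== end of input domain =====

-- B replaces A's repeated prediction.index and per-element list-membership scans by an
-- occurrence-index dict built once plus a marked-positions boolean array (objective: faster).

-- ===== PORT A =====
-- literal port of A: for each result name, prediction.index (ValueError → continue),
-- then an inner loop over range(0, p_index) testing list membership in `above`.
-- (prediction[i] is ported with pyGetD: i < p_index ≤ len(prediction), always in range)
def calculate_error3 (result : List String) (prediction : List String) : Int :=
  (result.foldl
    (fun (st : Int × List String) name =>
      match PySem.List.index? prediction name with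
      | none => st
      | some p =>
        let e := (PySem.List.pyRange 0 (p : Int)).foldl
          (fun e i => if st.2.contains (PySem.List.pyGetD prediction i "") then e else e + 1) st.1
        (e, st.2 ++ [name]))
    (0, [])).1

-- ===== PORT B =====
-- literal port of Source B: occ = dict name -> list of its indices in prediction
-- (setdefault(name, []).append(i) = modify with default [] appending);
-- marked = boolean array over prediction positions; added = set of processed names.
def calculate_error3_alt (result : List String) (prediction : List String) : Int :=
  let occ : PySem.Dict String (List Int) :=
    (PySem.List.enumerate prediction).foldl
      (fun d q => d.modify q.2 [] (fun L => L ++ [q.1])) PySem.Dict.empty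
  (result.foldl
    (fun (st : Int × List Bool × PySem.Set String) name =>
      if occ.contains name then
        let idxs := occ.getD name []
        let p := PySem.List.pyGetD idxs 0 0
        let e := st.1 + (p - (PySem.List.slice st.2.1 none (some p)).foldl
            (fun s b => s + (if b then 1 else 0)) 0)
        if st.2.2.contains name then (e, st.2.1, st.2.2)
        else (e, idxs.foldl (fun m i => PySem.List.pySetD m i true) st.2.1, st.2.2.add name)
      else st)
    (0, List.replicate prediction.length false, PySem.Set.empty)).1

-- ===== PRECONDITION & SPEC =====
def Spec_calculate_error3 (result : List String) (prediction : List String) (out : Int) : Prop := out = calculate_error3_alt result prediction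
instance (result : List String) (prediction : List String) (out : Int) : Decidable (Spec_calculate_error3 result prediction out) := by unfold Spec_calculate_error3; infer_instance

-- ===== CLAIM (what is proved, stated in full; the proofs are below) =====
def Claim_equal_calculate_error3 : Prop := ∀ (result : List String) (prediction : List String), Dom_calculate_error3 result prediction → Spec_calculate_error3 result prediction (calculate_error3 result prediction)

-- ===== LEMMAS AND PROOFS =====

-- the list of indices (from position s on) at which `name` occurs
def pvOccAux (xs : List String) (name : String) (s : Nat) : List Int :=
  match xs with
  | [] => []
  | x :: t => if x == name then (s : Int) :: pvOccAux t name (s + 1) else pvOccAux t name (s + 1)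

theorem pvEnumFilter (xs : List String) (name : String) (s : Nat) :
    ((PySem.List.enumerate xs (s : Int)).filter (fun q => q.2 == name)).map (·.1)
      = pvOccAux xs name s := by
  induction xs generalizing s with
  | nil => simp [PySem.List.enumerate, pvOccAux]
  | cons x t ih =>
    rw [PySem.List.enumerate_cons]
    have h1 : ((s : Int) + 1) = ((s + 1 : Nat) : Int) := by push_cast; ring
    by_cases hx : (x == name) = true
    · rw [List.filter_cons_of_pos (by simpa using hx), List.map_cons, h1, ih (s + 1)]
      simp [pvOccAux, hx]
    · rw [List.filter_cons_of_neg (by simpa using hx), h1, ih (s + 1)]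
      simp [pvOccAux, hx]

theorem pvOccAux_of_index? (xs : List String) (name : String) :
    ∀ (k : Nat) (s : Nat), PySem.List.index? xs name = some k →
    ∃ t, pvOccAux xs name s = ((s + k : Nat) : Int) :: t := by
  induction xs with
  | nil => intro k s h; simp [PySem.List.index?] at h
  | cons x t ih =>
    intro k s h
    by_cases hx : x = name
    · subst hx
      rw [PySem.List.index?_cons_self] at h
      obtain rfl : k = 0 := by simpa using h.symm
      exact ⟨pvOccAux t x (s + 1), by simp [pvOccAux]⟩
    · rw [PySem.List.index?_cons_of_ne t hx] at h
      obtain ⟨k', hk', rfl⟩ : ∃ k', PySem.List.index? t name = some k' ∧ k = k' + 1 := by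
        cases hidx : PySem.List.index? t name <;> rw [hidx] at h <;> simp_all
      obtain ⟨tl, htl⟩ := ih k' (s + 1) hk'
      refine ⟨tl, ?_⟩
      have : ((s + 1) + k' : Nat) = s + (k' + 1) := by omega
      simp [pvOccAux, (by simpa using hx : ¬ (x == name) = true), htl, this]

-- marking all occurrence positions of `name` in a mapped boolean array
theorem pvMark (xs : List String) (name : String) :
    ∀ (s : Nat) (pre : List Bool) (f : String → Bool), pre.length = s →
    (pvOccAux xs name s).foldl (fun m i => PySem.List.pySetD m i true) (pre ++ xs.map f)
      = pre ++ xs.map (fun x => if x == name then true else f x) := by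
  induction xs with
  | nil => intro s pre f h; simp [pvOccAux]
  | cons x t ih =>
    intro s pre f h
    by_cases hx : (x == name) = true
    · simp only [pvOccAux, if_pos hx, List.foldl_cons, List.map_cons]
      rw [PySem.List.pySetD_natCast, List.set_append, if_neg (by omega),
        show s - pre.length = 0 from by omega, List.set_cons_zero,
        show pre ++ true :: t.map f = (pre ++ [true]) ++ t.map f from by simp,
        ih (s + 1) (pre ++ [true]) f (by simp [h])]
      simp [hx]
    · simp only [pvOccAux, if_neg hx, List.map_cons]
      rw [show pre ++ f x :: t.map f = (pre ++ [f x]) ++ t.map f from by simp,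
        ih (s + 1) (pre ++ [f x]) f (by simp [h])]
      simp [hx]

theorem pvCount (prediction above : List String) (added : PySem.Set String)
    (hinv : ∀ x, above.contains x = added.contains x) (k : Nat) (hk : k ≤ prediction.length) (e : Int) :
    (PySem.List.pyRange 0 (k : Int)).foldl
        (fun e i => if above.contains (PySem.List.pyGetD prediction i "") then e else e + 1) e
      = e + ((k : Int) - (PySem.List.slice (prediction.map (fun x => added.contains x)) none (some (k : Int))).foldl
          (fun s b => s + (if b then 1 else 0)) 0) := by
  have hlen : (prediction.take k).length = k := by simp [hk]
  have h1 : (PySem.List.pyRange 0 (k : Int)).foldl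
        (fun e i => if above.contains (PySem.List.pyGetD prediction i "") then e else e + 1) e
      = (PySem.List.pyRange 0 (k : Int)).foldl
        (fun e i => if (!added.contains (PySem.List.pyGetD (prediction.take k) i "")) = true then e + 1 else e) e := by
    apply PySem.List.foldl_congr_mem
    intro acc i hi
    rw [PySem.List.mem_pyRange_one] at hi
    have hilen : i < (prediction.length : Int) := by
      have : (k : Int) ≤ (prediction.length : Int) := by exact_mod_cast hk
      omega
    have hitake : i < ((prediction.take k).length : Int) := by rw [hlen]; exact hi.2
    rw [PySem.List.pyGetD_eq_getElem prediction "" hi.1 hilen,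
        PySem.List.pyGetD_eq_getElem (prediction.take k) "" hi.1 hitake,
        List.getElem_take, hinv]
    cases added.contains (prediction[i.toNat]'(by omega)) <;> simp
  rw [h1, PySem.List.slice_to_natCast, ← List.map_take]
  have h4 : ((prediction.take k).map (fun x => added.contains x)).foldl (fun s b => s + (if b then 1 else 0)) (0 : Int)
      = ((prediction.take k).map (fun x => added.contains x)).foldl (fun b x => if x = true then b + 1 else b) (0 : Int) :=
    PySem.List.foldl_congr_mem _ _ _ _ (by intro acc b _; cases b <;> simp)
  simp only [h4]
  rw [PySem.List.foldl_if_add_one (fun b => b), List.countP_map,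
      show ((k : Int)) = ((prediction.take k).length : Int) from by rw [hlen],
      PySem.List.foldl_pyRange_zero_pyGetD' (prediction.take k) ""
        (fun acc x => if (!added.contains x) = true then acc + 1 else acc) e,
      PySem.List.foldl_if_add_one (fun x => !added.contains x)]
  have h5 := List.length_eq_countP_add_countP (fun x => added.contains x) (l := prediction.take k)
  rw [hlen] at h5
  have h6 : List.countP (fun a => decide ¬ (added.contains a) = true) (prediction.take k)
      = List.countP (fun a => !added.contains a) (prediction.take k) :=
    List.countP_congr (by intro a _; cases h : added.contains a <;> simp [h])
  rw [h6] at h5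
  have h7 : List.countP ((fun b => b) ∘ (fun x => added.contains x)) (prediction.take k)
      = List.countP (fun x => added.contains x) (prediction.take k) := by
    apply List.countP_congr; intro a _; rfl
  rw [h7, hlen]
  push_cast
  omega

theorem pvContainsAppend (above : List String) (name x : String) :
    (above ++ [name]).contains x = (above.contains x || x == name) := by
  by_cases h1 : x ∈ above <;> by_cases h2 : x = name <;> simp [h1, h2]

theorem pvContainsAdd (s : PySem.Set String) (n x : String) :
    (s.add n).contains x = (s.contains x || x == n) := by
  by_cases hx : x = n <;> by_cases hs : n ∈ s <;>
    simp [PySem.Set.add_eq_ite, PySem.Set.contains_eq_listContains, hx, hs]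

theorem pvOcc_getD (prediction : List String) (name : String) :
    ((PySem.List.enumerate prediction).foldl
        (fun d q => d.modify q.2 [] (fun L => L ++ [q.1])) PySem.Dict.empty).getD name []
      = pvOccAux prediction name 0 := by
  have h := PySem.Dict.getD_foldl_modify_append
    ((PySem.List.enumerate prediction).map (fun q => (q.2, q.1)))
    (PySem.Dict.empty : PySem.Dict String (List Int)) name
  rw [List.foldl_map] at h
  simp only [] at h
  rw [h]
  have h2 : ((PySem.List.enumerate prediction).map (fun q => (q.2, q.1))).filter
        (fun p => p.1 == name)
      = ((PySem.List.enumerate prediction).filter (fun q => q.2 == name)).map (fun q => (q.2, q.1)) := by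
    rw [List.filter_map]; rfl
  rw [h2, List.map_map]
  have h3 := pvEnumFilter prediction name 0
  simp only [Nat.cast_zero] at h3
  rw [show ((fun x => x.2) ∘ (fun (q : Int × String) => (q.2, q.1))) = fun (q : Int × String) => q.1 from rfl]
  rw [show (List.map (fun (q : Int × String) => q.1)) = (List.map (fun (q : Int × String) => q.1)) from rfl]
  simp only [PySem.Dict.empty, PySem.Dict.getD, PySem.Dict.get?]
  rw [← h3]
  rfl

theorem pvOcc_contains (prediction : List String) (name : String) :
    ((PySem.List.enumerate prediction).foldl
        (fun d q => d.modify q.2 [] (fun L => L ++ [q.1])) PySem.Dict.empty).contains name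
      = decide (name ∈ prediction) := by
  have hkeys := PySem.Dict.keys_foldl_modify_key (PySem.List.enumerate prediction)
    (fun q => q.2) ([] : List Int) (fun _ q L => L ++ [q.1]) PySem.Dict.empty
  simp only [PySem.List.map_snd_enumerate] at hkeys
  have hk2 : ((PySem.List.enumerate prediction).foldl
      (fun d q => d.modify q.2 [] (fun L => L ++ [q.1])) PySem.Dict.empty).keys
      = PySem.Set.ofList prediction := by
    rw [hkeys]
    exact PySem.Set.update_nil_left prediction
  have hgen : ∀ (d : PySem.Dict String (List Int)) (k : String),
      d.contains k = d.keys.any (· == k) := by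
    intro d k
    simp only [PySem.Dict.contains, PySem.Dict.keys, List.any_map]
    rfl
  rw [hgen, hk2]
  by_cases hm : name ∈ prediction
  · simp [List.any_eq_true, PySem.Set.mem_ofList, hm]
  · have hnone : ∀ x ∈ PySem.Set.ofList prediction, ¬((x == name) = true) := by
      intro x hx h
      exact hm (eq_of_beq h ▸ (PySem.Set.mem_ofList prediction x).mp hx)
    simp [hm, List.any_eq_false.mpr hnone]

theorem pvLoop (prediction : List String) (occ : PySem.Dict String (List Int))
    (hc : ∀ name, occ.contains name = decide (name ∈ prediction))
    (hg : ∀ name, occ.getD name [] = pvOccAux prediction name 0) :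
    ∀ (res : List String) (e : Int) (above : List String) (added : PySem.Set String),
    (∀ x, above.contains x = added.contains x) →
    (res.foldl
      (fun (st : Int × List String) name =>
        match PySem.List.index? prediction name with
        | none => st
        | some p =>
          let e := (PySem.List.pyRange 0 (p : Int)).foldl
            (fun e i => if st.2.contains (PySem.List.pyGetD prediction i "") then e else e + 1) st.1
          (e, st.2 ++ [name])) (e, above)).1
    = (res.foldl
      (fun (st : Int × List Bool × PySem.Set String) name =>
        if occ.contains name then
          let idxs := occ.getD name []
          let p := PySem.List.pyGetD idxs 0 0
          let e := st.1 + (p - (PySem.List.slice st.2.1 none (some p)).foldl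
              (fun s b => s + (if b then 1 else 0)) 0)
          if st.2.2.contains name then (e, st.2.1, st.2.2)
          else (e, idxs.foldl (fun m i => PySem.List.pySetD m i true) st.2.1, st.2.2.add name)
        else st) (e, prediction.map (fun x => added.contains x), added)).1 := by
  intro res
  induction res with
  | nil => intro e above added hinv; rfl
  | cons name res ih =>
    intro e above added hinv
    simp only [List.foldl_cons]
    by_cases hm : name ∈ prediction
    · obtain ⟨k, hk⟩ : ∃ k, PySem.List.index? prediction name = some k :=
        Option.isSome_iff_exists.mp ((PySem.List.index?_isSome_iff prediction name).mpr hm)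
      obtain ⟨hklt, -, -⟩ := PySem.List.getElem_of_index?_eq_some hk
      obtain ⟨tl, htl⟩ := pvOccAux_of_index? prediction name k 0 hk
      have hp : PySem.List.pyGetD (occ.getD name []) 0 0 = (k : Int) := by
        rw [hg name, htl]
        simpa using PySem.List.pyGetD_zero_cons _ tl 0
      have hcont : occ.contains name = true := by rw [hc name]; simp [hm]
      have hcount := pvCount prediction above added hinv k (le_of_lt hklt) e
      simp only [hk, hcont, if_true, hp, hcount]
      by_cases hb : added.contains name = true
      · simp only [hb, if_true]
        exact ih _ (above ++ [name]) added (by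
          intro x
          rw [pvContainsAppend, hinv x]
          by_cases hx : x = name
          · subst hx; rw [hb]; simp
          · simp [hx])
      · simp only [hb, if_false]
        have hmark : (occ.getD name []).foldl (fun m i => PySem.List.pySetD m i true)
            (prediction.map (fun x => added.contains x))
            = prediction.map (fun x => (added.add name).contains x) := by
          rw [hg name]
          have h := pvMark prediction name 0 [] (fun x => added.contains x) rfl
          simp only [List.nil_append] at h
          rw [h]
          apply List.map_congr_left
          intro x _
          rw [pvContainsAdd]
          by_cases hx : (x == name) = true <;> simp [hx]
        rw [hmark]
        exact ih _ (above ++ [name]) (added.add name) (by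
          intro x
          rw [pvContainsAppend, hinv x, pvContainsAdd])
    · have hk : PySem.List.index? prediction name = none :=
        (PySem.List.index?_eq_none_iff prediction name).mpr hm
      have hcont : occ.contains name = false := by rw [hc name]; simp [hm]
      simp only [hk, hcont, Bool.false_eq_true, if_false]
      exact ih e above added hinv

-- ===== VERDICT (by name: the statement is the Claim_ definition above) =====
theorem calculate_error3_spec : Claim_equal_calculate_error3 := by
  intro result prediction _
  unfold Spec_calculate_error3 calculate_error3 calculate_error3_alt
  have hrep : List.replicate prediction.length false
      = prediction.map (fun x => (PySem.Set.empty : PySem.Set String).contains x) := by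
    simp
  rw [hrep]
  exact pvLoop prediction _ (pvOcc_contains prediction) (pvOcc_getD prediction)
    result 0 [] PySem.Set.empty (fun x => rfl)
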